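-- pv_equiv track=rewrite | github.com/mirovoy465/karpov_ml | py1/py1.py | find_cat_tasks_2
-- ===== SOURCE A (Python) =====
-- def find_cat_tasks_2(tasks):
--     answer = []
--     for key in range(2):
--         for task in tasks[key]:
--             if len(answer) >= 2:
--                 break
--             if 'cat' in task:
--                 answer.append(task)
--     return answer
-- ===== SOURCE B (Python) =====
-- def find_cat_tasks_2(tasks):
--     # recursive, need-driven decomposition: take the first k matches of a list,
--     # solve sublist 0 for need=2, then sublist 1 for whatever need remains
--     first, second = tasks[0], tasks[1]
--
--     def first_k(items, k):
--         if not items: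
--             return []
--         head, rest = items[0], items[1:]
--         if k == 0:
--             return []
--         if 'cat' in head:
--             return [head] + first_k(rest, k - 1)
--         return first_k(rest, k)
--
--     got = first_k(first, 2)
--     return got + first_k(second, 2 - len(got))
-- ===== Notes on version B (the rewrite author's own statement) =====
-- stated objective: alternative
-- what changed: Replaces A's accumulator loop over range(2) with a manual len>=2 break by a recursive first_k(items,k) that cons-builds the first k matches, composed as first_k(tasks[0],2) ++ first_k(tasks[1], remaining need).
import Mathlib
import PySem

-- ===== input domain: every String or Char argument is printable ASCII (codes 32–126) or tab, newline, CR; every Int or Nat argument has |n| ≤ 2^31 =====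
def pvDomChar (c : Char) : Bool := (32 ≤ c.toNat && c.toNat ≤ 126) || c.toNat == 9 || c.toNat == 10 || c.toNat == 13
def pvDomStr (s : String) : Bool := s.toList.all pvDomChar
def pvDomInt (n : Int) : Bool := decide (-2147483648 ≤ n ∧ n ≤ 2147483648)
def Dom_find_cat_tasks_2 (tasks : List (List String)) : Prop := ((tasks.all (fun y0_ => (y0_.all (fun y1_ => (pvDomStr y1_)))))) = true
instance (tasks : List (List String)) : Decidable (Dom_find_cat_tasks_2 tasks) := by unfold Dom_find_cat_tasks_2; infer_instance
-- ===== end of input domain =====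

-- B replaces A's accumulator loop with a break by a recursive need-driven helper:
-- first_k(items, k) cons-builds the first k matches, applied to sublist 0 with need 2
-- and to sublist 1 with the remaining need.

-- ===== PORT A =====
-- inner loop: 'for task in xs: if len(answer) >= 2: break; if "cat" in task: answer.append(task)'
def fctInner (answer : List String) (xs : List String) : List String :=
  match xs with
  | [] => answer
  | task :: rest =>
      if answer.length ≥ 2 then answer
      else fctInner (if PySem.Str.isIn "cat" task then answer ++ [task] else answer) rest

-- outer loop 'for key in range(2)' unrolled over the constant range: key = 0, then key = 1
def find_cat_tasks_2 (tasks : List (List String)) : List String :=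
  fctInner (fctInner [] ((PySem.List.pyGet? tasks 0).getD [])) ((PySem.List.pyGet? tasks 1).getD [])

-- ===== PORT B =====
-- def first_k(items, k): recursion on items, cons-building the first k matches
def firstK (items : List String) (k : Int) : List String :=
  match items with
  | [] => []
  | head :: rest =>
      if k = 0 then []
      else if PySem.Str.isIn "cat" head then head :: firstK rest (k - 1)
      else firstK rest k

-- got = first_k(tasks[0], 2); return got + first_k(tasks[1], 2 - len(got))
def find_cat_tasks_2_alt (tasks : List (List String)) : List String :=
  let got := firstK ((PySem.List.pyGet? tasks 0).getD []) 2
  got ++ firstK ((PySem.List.pyGet? tasks 1).getD []) (2 - got.length)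

-- ===== PRECONDITION & SPEC =====
-- Pre_: Python A evaluates tasks[0] and tasks[1] and raises IndexError when len(tasks) < 2.
def Pre_find_cat_tasks_2 (tasks : List (List String)) : Prop := 2 ≤ tasks.length
instance (tasks : List (List String)) : Decidable (Pre_find_cat_tasks_2 tasks) := by unfold Pre_find_cat_tasks_2; infer_instance
def pvWitness_find_cat_tasks_2 : List (List String) := [["cat nap", "dog"], ["scatter"]]

def Spec_find_cat_tasks_2 (tasks : List (List String)) (out : List String) : Prop := out = find_cat_tasks_2_alt tasks
instance (tasks : List (List String)) (out : List String) : Decidable (Spec_find_cat_tasks_2 tasks out) := by unfold Spec_find_cat_tasks_2; infer_instance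

-- ===== CLAIM (what is proved, stated in full; the proofs are below) =====
def Claim_equal_find_cat_tasks_2 : Prop := ∀ (tasks : List (List String)), Dom_find_cat_tasks_2 tasks → Pre_find_cat_tasks_2 tasks → Spec_find_cat_tasks_2 tasks (find_cat_tasks_2 tasks)

-- ===== LEMMAS AND PROOFS =====

-- A's inner loop appends the matches of xs onto answer, truncated to two elements.
theorem fctInner_eq_take (xs answer : List String) (h : answer.length ≤ 2) :
    fctInner answer xs = (answer ++ xs.filter (fun t => PySem.Str.isIn "cat" t)).take 2 := by
  induction xs generalizing answer with
  | nil =>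
      simp [fctInner, List.take_of_length_le h]
  | cons task rest ih =>
      rw [fctInner]
      by_cases h2 : answer.length ≥ 2
      · have hlen : answer.length = 2 := le_antisymm h h2
        rw [if_pos h2, List.take_append_of_le_length (by omega),
            List.take_of_length_le (le_of_eq hlen)]
      · by_cases hc : PySem.Str.isIn "cat" task
        · rw [if_neg h2, if_pos hc, ih _ (by simp; omega),
              List.filter_cons_of_pos hc, List.append_assoc, List.singleton_append]
        · rw [if_neg h2, if_neg hc, ih _ h,
              List.filter_cons_of_neg (by simpa using hc)]

-- B's helper returns the first k matches of the list.
theorem firstK_eq_take (items : List String) (k : Int) (hk : 0 ≤ k) :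
    firstK items k = (items.filter (fun t => PySem.Str.isIn "cat" t)).take k.toNat := by
  induction items generalizing k with
  | nil => simp [firstK]
  | cons head rest ih =>
      rw [firstK]
      by_cases h0 : k = 0
      · simp [h0]
      · rw [if_neg h0]
        by_cases hc : PySem.Str.isIn "cat" head
        · rw [if_pos hc, ih _ (by omega), List.filter_cons_of_pos hc]
          have : k.toNat = (k - 1).toNat + 1 := by omega
          rw [this, List.take_succ_cons]
        · rw [if_neg hc, ih _ hk, List.filter_cons_of_neg (by simpa using hc)]

theorem take_two_split (l m : List String) :
    l.take 2 ++ m.take (2 - (l.take 2).length) = (l ++ m).take 2 := by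
  match l with
  | [] => rfl
  | [a] => rfl
  | a :: b :: t => simp

theorem take_two_append (l m : List String) : (l.take 2 ++ m).take 2 = (l ++ m).take 2 := by
  match l with
  | [] => rfl
  | [a] => rfl
  | a :: b :: t => simp

-- ===== VERDICT (by name: the statement is the Claim_ definition above) =====
theorem find_cat_tasks_2_spec : Claim_equal_find_cat_tasks_2 := by
  intro tasks _ _
  show _ = _
  set f := (PySem.List.pyGet? tasks 0).getD [] with hf
  set s := (PySem.List.pyGet? tasks 1).getD [] with hs
  have hB : find_cat_tasks_2_alt tasks =
      firstK f 2 ++ firstK s (2 - (firstK f 2).length) := rfl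
  have hA : find_cat_tasks_2 tasks = fctInner (fctInner [] f) s := rfl
  rw [hA, hB, fctInner_eq_take _ [] (by simp), List.nil_append,
      fctInner_eq_take _ _ (List.length_take_le 2 _)]
  have h2 : firstK f 2 = (f.filter (fun t => PySem.Str.isIn "cat" t)).take 2 := by
    simpa using firstK_eq_take f 2 (by norm_num)
  rw [h2]
  have hlen : ((f.filter (fun t => PySem.Str.isIn "cat" t)).take 2).length ≤ 2 :=
    List.length_take_le 2 _
  have htn : ((2 : Int) - ((f.filter (fun t => PySem.Str.isIn "cat" t)).take 2).length).toNat
      = 2 - ((f.filter (fun t => PySem.Str.isIn "cat" t)).take 2).length := by omega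
  rw [firstK_eq_take _ _ (by omega), htn, take_two_split, take_two_append]
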